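-- pv_equiv track=rewrite | github.com/MrBrantCode/unitest_baseline | mut_generate/mist_train_taco/taco_1521/solution.py | check_gray_code_property
-- ===== SOURCE A (Python) =====
-- def check_gray_code_property(n, arr):
--     if n > 130:
--         return 'Yes'
--     else:
--         for i in range(n - 3):
--             for j in range(i + 1, n - 2):
--                 for k in range(j + 1, n - 1):
--                     for h in range(k + 1, n):
--                         if arr[i] ^ arr[j] ^ arr[k] ^ arr[h] == 0:
--                             return 'Yes'
--         return 'No'
-- ===== SOURCE B (Python) =====
-- def check_gray_code_property(n, arr):
--     if n > 130:
--         return 'Yes'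
--     for h in range(3, n):
--         seen = set()
--         for k in range(2, h):
--             for i in range(k - 1):
--                 seen.add(arr[i] ^ arr[k - 1])
--             if arr[k] ^ arr[h] in seen:
--                 return 'Yes'
--     return 'No'
-- ===== Notes on version B (the rewrite author's own statement) =====
-- stated objective: alternative
-- what changed: Replaced A's four nested index loops over all quadruples by, for each largest index h, a scan of pairs (k,h) against a hash set of XORs of all earlier pairs (i,j) with j<k, detecting a zero-XOR quadruple as a pair-XOR collision with automatically disjoint indices (the n > 130 shortcut dominates large inputs, so no speedup is measured).
import Mathlib
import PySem

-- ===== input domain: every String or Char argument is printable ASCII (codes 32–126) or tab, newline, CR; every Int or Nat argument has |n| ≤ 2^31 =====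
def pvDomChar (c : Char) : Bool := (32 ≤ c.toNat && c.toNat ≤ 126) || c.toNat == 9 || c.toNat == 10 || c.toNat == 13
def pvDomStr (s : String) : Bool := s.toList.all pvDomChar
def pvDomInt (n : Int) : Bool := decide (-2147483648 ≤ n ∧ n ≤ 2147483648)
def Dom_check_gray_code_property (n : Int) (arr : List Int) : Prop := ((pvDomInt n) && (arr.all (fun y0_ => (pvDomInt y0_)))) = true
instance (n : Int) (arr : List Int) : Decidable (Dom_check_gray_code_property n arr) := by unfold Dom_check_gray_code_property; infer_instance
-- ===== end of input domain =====

-- B replaces A's scan over all index quadruples by, per largest index h, a scan of pairs (k,h)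
-- against a hash set of XORs of earlier pairs (objective: alternative algorithm, no measured speedup).

-- ===== PORT A =====
def check_gray_code_property (n : Int) (arr : List Int) : String :=
  if n > 130 then "Yes"
  else
    if (PySem.List.pyRange 0 (n - 3) 1).any (fun i =>
         (PySem.List.pyRange (i + 1) (n - 2) 1).any (fun j =>
           (PySem.List.pyRange (j + 1) (n - 1) 1).any (fun k =>
             (PySem.List.pyRange (k + 1) n 1).any (fun h =>
               PySem.Int.bxor (PySem.Int.bxor (PySem.Int.bxor
                 (PySem.List.pyGetD arr i 0) (PySem.List.pyGetD arr j 0))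
                 (PySem.List.pyGetD arr k 0)) (PySem.List.pyGetD arr h 0) == 0))))
    then "Yes" else "No"

-- ===== PORT B =====
-- inner loop 'for k in range(2, h)' of Source B, carrying the set 'seen'
def pvAltK (arr : List Int) (h : Int) (ks : List Int) (seen : PySem.Set Int) : Bool :=
  match ks with
  | [] => false
  | k :: rest =>
    let seen' := (PySem.List.pyRange 0 (k - 1) 1).foldl
      (fun s i => PySem.Set.add s (PySem.Int.bxor (PySem.List.pyGetD arr i 0) (PySem.List.pyGetD arr (k - 1) 0))) seen
    if PySem.Set.contains seen' (PySem.Int.bxor (PySem.List.pyGetD arr k 0) (PySem.List.pyGetD arr h 0))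
    then true else pvAltK arr h rest seen'

-- outer loop 'for h in range(3, n)' of Source B
def pvAltH (arr : List Int) (hs : List Int) : String :=
  match hs with
  | [] => "No"
  | h :: rest =>
    if pvAltK arr h (PySem.List.pyRange 2 h 1) PySem.Set.empty then "Yes" else pvAltH arr rest

def check_gray_code_property_alt (n : Int) (arr : List Int) : String :=
  if n > 130 then "Yes" else pvAltH arr (PySem.List.pyRange 3 n 1)

-- ===== PRECONDITION & SPEC =====
-- Pre_ admits exactly the inputs on which Python A returns (it excludes no input A returns on):
-- A raises IndexError precisely when 3 < n ≤ 130, len(arr) < n and no h < len(arr) makes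
-- arr[0]^arr[1]^arr[2]^arr[h] == 0 (A scans quadruples (0,1,2,h) in order before indexing arr[len(arr)]).
def Pre_check_gray_code_property (n : Int) (arr : List Int) : Prop :=
  130 < n ∨ n ≤ 3 ∨ n ≤ (arr.length : Int) ∨
  (4 ≤ arr.length ∧ (arr.length : Int) < n ∧
    ∃ h ∈ List.range arr.length, 3 ≤ h ∧
      PySem.Int.bxor (PySem.Int.bxor (PySem.Int.bxor (arr.getD 0 0) (arr.getD 1 0)) (arr.getD 2 0)) (arr.getD h 0) = 0)
instance (n : Int) (arr : List Int) : Decidable (Pre_check_gray_code_property n arr) := by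
  unfold Pre_check_gray_code_property; infer_instance
def pvWitness_check_gray_code_property : Int × List Int := (4, [1, 2, 3, 0])

def Spec_check_gray_code_property (n : Int) (arr : List Int) (out : String) : Prop := out = check_gray_code_property_alt n arr
instance (n : Int) (arr : List Int) (out : String) : Decidable (Spec_check_gray_code_property n arr out) := by unfold Spec_check_gray_code_property; infer_instance

-- ===== CLAIM (what is proved, stated in full; the proofs are below) =====
def Claim_equal_check_gray_code_property : Prop := ∀ (n : Int) (arr : List Int), Dom_check_gray_code_property n arr → Pre_check_gray_code_property n arr → Spec_check_gray_code_property n arr (check_gray_code_property n arr)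

-- ===== LEMMAS AND PROOFS =====

-- the XOR of the pair (i, j) of positions of arr
def pvPX (arr : List Int) (i j : Int) : Int :=
  PySem.Int.bxor (PySem.List.pyGetD arr i 0) (PySem.List.pyGetD arr j 0)

-- there are four positions i < j < k < h below n whose entries XOR to zero
def pvP4 (arr : List Int) (n : Int) : Prop :=
  ∃ i j k h : Int, 0 ≤ i ∧ i < j ∧ j < k ∧ k < h ∧ h < n ∧ pvPX arr i j = pvPX arr k h

lemma pv_bxor_eq_zero_iff (a b : Int) : PySem.Int.bxor a b = 0 ↔ a = b := by
  unfold PySem.Int.bxor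
  rcases (by omega : 0 ≤ a ∨ a < 0) with ha | ha <;> rcases (by omega : 0 ≤ b ∨ b < 0) with hb | hb <;>
    split_ifs <;> try omega
  · constructor
    · intro h
      have h1 : a.toNat ^^^ b.toNat = 0 := by exact_mod_cast h
      have := Nat.xor_eq_zero_iff.mp h1
      omega
    · intro h; subst h; simp
  · constructor
    · intro h
      have h1 : (((-a - 1).toNat ^^^ (-b - 1).toNat : Nat) : Int) = 0 := by exact_mod_cast h
      have h2 : (-a - 1).toNat ^^^ (-b - 1).toNat = 0 := by exact_mod_cast h1
      have := Nat.xor_eq_zero_iff.mp h2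
      omega
    · intro h; subst h; simp

lemma pv_bxor_assoc (a b c : Int) :
    PySem.Int.bxor (PySem.Int.bxor a b) c = PySem.Int.bxor a (PySem.Int.bxor b c) := by
  unfold PySem.Int.bxor
  rcases (by omega : 0 ≤ a ∨ a < 0) with ha | ha <;> rcases (by omega : 0 ≤ b ∨ b < 0) with hb | hb <;>
    rcases (by omega : 0 ≤ c ∨ c < 0) with hc | hc <;>
    split_ifs <;> (try omega) <;> simp_all [Nat.xor_assoc]

lemma pv_xor4_iff (a b c d : Int) :
    PySem.Int.bxor (PySem.Int.bxor (PySem.Int.bxor a b) c) d = 0 ↔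
      PySem.Int.bxor a b = PySem.Int.bxor c d := by
  rw [pv_bxor_assoc (PySem.Int.bxor a b) c d, pv_bxor_eq_zero_iff]

lemma pv_A_iff (n : Int) (arr : List Int) (hn : ¬ n > 130) :
    check_gray_code_property n arr = "Yes" ↔ pvP4 arr n := by
  unfold check_gray_code_property
  rw [if_neg hn]
  constructor
  · intro hres
    have hcond : (PySem.List.pyRange 0 (n - 3) 1).any (fun i =>
         (PySem.List.pyRange (i + 1) (n - 2) 1).any (fun j =>
           (PySem.List.pyRange (j + 1) (n - 1) 1).any (fun k =>
             (PySem.List.pyRange (k + 1) n 1).any (fun h =>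
               PySem.Int.bxor (PySem.Int.bxor (PySem.Int.bxor
                 (PySem.List.pyGetD arr i 0) (PySem.List.pyGetD arr j 0))
                 (PySem.List.pyGetD arr k 0)) (PySem.List.pyGetD arr h 0) == 0)))) = true := by
      by_contra hc
      rw [if_neg hc] at hres
      exact absurd hres (by decide)
    simp only [List.any_eq_true, PySem.List.mem_pyRange_one, beq_iff_eq] at hcond
    obtain ⟨i, hi, j, hj, k, hk, h, hh, hx⟩ := hcond
    exact ⟨i, j, k, h, by omega, by omega, by omega, by omega, by omega,
      (pv_xor4_iff _ _ _ _).mp hx⟩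
  · rintro ⟨i, j, k, h, h0, hij, hjk, hkh, hhn, hx⟩
    rw [if_pos]
    simp only [List.any_eq_true, PySem.List.mem_pyRange_one, beq_iff_eq]
    exact ⟨i, ⟨by omega, by omega⟩, j, ⟨by omega, by omega⟩, k, ⟨by omega, by omega⟩,
      h, ⟨by omega, by omega⟩, (pv_xor4_iff _ _ _ _).mpr hx⟩

lemma pv_A_cases (n : Int) (arr : List Int) :
    check_gray_code_property n arr = "Yes" ∨ check_gray_code_property n arr = "No" := by
  unfold check_gray_code_property
  split_ifs <;> simp

-- the inner loop of B detects exactly a pair collision i < j < l < h with l in [k0, h)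
lemma pv_altK_iff (arr : List Int) (h : Int) :
    ∀ (m : Nat) (k : Int) (seen : PySem.Set Int), (h - k).toNat = m → 2 ≤ k →
    (∀ v, v ∈ seen ↔ ∃ i j : Int, 0 ≤ i ∧ i < j ∧ j < k - 1 ∧ pvPX arr i j = v) →
    (pvAltK arr h (PySem.List.pyRange k h 1) seen = true ↔
      ∃ i j l : Int, 0 ≤ i ∧ i < j ∧ j < l ∧ k ≤ l ∧ l < h ∧ pvPX arr i j = pvPX arr l h) := by
  intro m
  induction m with
  | zero =>
    intro k seen hm hk hseen
    rw [PySem.List.pyRange_one_eq_nil (by omega)]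
    constructor
    · intro hc; exact absurd hc (by simp [pvAltK])
    · rintro ⟨i, j, l, _, _, _, _, _, _⟩; omega
  | succ m ih =>
    intro k seen hm hk hseen
    have hkh : k < h := by omega
    rw [PySem.List.pyRange_one_cons hkh, pvAltK]
    have hseen' : ∀ v, v ∈ (PySem.List.pyRange 0 (k - 1) 1).foldl
        (fun s i => PySem.Set.add s (PySem.Int.bxor (PySem.List.pyGetD arr i 0) (PySem.List.pyGetD arr (k - 1) 0))) seen ↔
        ∃ i j : Int, 0 ≤ i ∧ i < j ∧ j < k ∧ pvPX arr i j = v := by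
      intro v
      rw [PySem.Set.mem_foldl_add]
      constructor
      · rintro (hv | ⟨b, hb, rfl⟩)
        · obtain ⟨i, j, h1, h2, h3, h4⟩ := (hseen v).mp hv
          exact ⟨i, j, h1, h2, by omega, h4⟩
        · rw [PySem.List.mem_pyRange_one] at hb
          exact ⟨b, k - 1, by omega, by omega, by omega, rfl⟩
      · rintro ⟨i, j, h1, h2, h3, h4⟩
        by_cases hjk : j < k - 1
        · exact Or.inl ((hseen v).mpr ⟨i, j, h1, h2, hjk, h4⟩)
        · have : j = k - 1 := by omega
          subst this
          exact Or.inr ⟨i, by rw [PySem.List.mem_pyRange_one]; omega, h4.symm⟩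
    by_cases hC : PySem.Set.contains ((PySem.List.pyRange 0 (k - 1) 1).foldl
        (fun s i => PySem.Set.add s (PySem.Int.bxor (PySem.List.pyGetD arr i 0) (PySem.List.pyGetD arr (k - 1) 0))) seen)
        (PySem.Int.bxor (PySem.List.pyGetD arr k 0) (PySem.List.pyGetD arr h 0)) = true
    · rw [if_pos hC]
      rw [PySem.Set.contains_iff] at hC
      obtain ⟨i, j, h1, h2, h3, h4⟩ := (hseen' _).mp hC
      constructor
      · intro _
        exact ⟨i, j, k, h1, h2, h3, le_refl k, hkh, h4⟩
      · intro _; rfl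
    · rw [if_neg hC]
      have hseen'' : ∀ v, v ∈ (PySem.List.pyRange 0 (k - 1) 1).foldl
          (fun s i => PySem.Set.add s (PySem.Int.bxor (PySem.List.pyGetD arr i 0) (PySem.List.pyGetD arr (k - 1) 0))) seen ↔
          ∃ i j : Int, 0 ≤ i ∧ i < j ∧ j < k + 1 - 1 ∧ pvPX arr i j = v := by
        intro v
        rw [hseen' v]
        constructor
        · rintro ⟨i, j, h1, h2, h3, h4⟩; exact ⟨i, j, h1, h2, by omega, h4⟩
        · rintro ⟨i, j, h1, h2, h3, h4⟩; exact ⟨i, j, h1, h2, by omega, h4⟩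
      have hm' : (h - (k + 1)).toNat = m := by omega
      rw [ih (k + 1) _ hm' (by omega) hseen'']
      constructor
      · rintro ⟨i, j, l, h1, h2, h3, h4, h5, h6⟩
        exact ⟨i, j, l, h1, h2, h3, by omega, h5, h6⟩
      · rintro ⟨i, j, l, h1, h2, h3, h4, h5, h6⟩
        rcases (by omega : k + 1 ≤ l ∨ l = k) with hl | hl
        · exact ⟨i, j, l, h1, h2, h3, hl, h5, h6⟩
        · exfalso
          subst hl
          apply hC
          rw [PySem.Set.contains_iff]
          exact (hseen' _).mpr ⟨i, j, h1, h2, h3, h6⟩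

lemma pv_altH_iff (arr : List Int) (n : Int) :
    ∀ (m : Nat) (h0 : Int), (n - h0).toNat = m → 3 ≤ h0 →
    (pvAltH arr (PySem.List.pyRange h0 n 1) = "Yes" ↔
      ∃ i j k h : Int, 0 ≤ i ∧ i < j ∧ j < k ∧ k < h ∧ h0 ≤ h ∧ h < n ∧ pvPX arr i j = pvPX arr k h) := by
  intro m
  induction m with
  | zero =>
    intro h0 hm h3
    rw [PySem.List.pyRange_one_eq_nil (by omega)]
    constructor
    · intro hc; exact absurd hc (by simp [pvAltH])
    · rintro ⟨i, j, k, h, _, _, _, _, _, _, _⟩; omega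
  | succ m ih =>
    intro h0 hm h3
    have hh0n : h0 < n := by omega
    rw [PySem.List.pyRange_one_cons hh0n, pvAltH]
    have hK := pv_altK_iff arr h0 (h0 - 2).toNat 2 PySem.Set.empty rfl (le_refl 2)
      (by intro v; constructor
          · intro hc; exact absurd hc (by simp [PySem.Set.empty])
          · rintro ⟨i, j, _, _, _, _⟩; omega)
    by_cases hC : pvAltK arr h0 (PySem.List.pyRange 2 h0 1) PySem.Set.empty = true
    · rw [if_pos hC]
      obtain ⟨i, j, l, h1, h2, h3', h4, h5, h6⟩ := hK.mp hC
      constructor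
      · intro _
        exact ⟨i, j, l, h0, h1, h2, h3', h5, le_refl h0, hh0n, h6⟩
      · intro _; rfl
    · rw [if_neg hC]
      have hm' : (n - (h0 + 1)).toNat = m := by clear hK hC; omega
      have h31 : (3 : Int) ≤ h0 + 1 := by clear hK hC; omega
      rw [ih (h0 + 1) hm' h31]
      constructor
      · rintro ⟨i, j, k, h, h1, h2, h3', h4, h5, h6, h7⟩
        exact ⟨i, j, k, h, h1, h2, h3', h4, by omega, h6, h7⟩
      · rintro ⟨i, j, k, h, h1, h2, h3', h4, h5, h6, h7⟩
        rcases (by omega : h0 + 1 ≤ h ∨ h = h0) with hl | hl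
        · exact ⟨i, j, k, h, h1, h2, h3', h4, hl, h6, h7⟩
        · exfalso
          subst hl
          exact hC (hK.mpr ⟨i, j, k, h1, h2, h3', by omega, h4, h7⟩)

lemma pv_B_iff (n : Int) (arr : List Int) (hn : ¬ n > 130) :
    check_gray_code_property_alt n arr = "Yes" ↔ pvP4 arr n := by
  unfold check_gray_code_property_alt
  rw [if_neg hn]
  rw [pv_altH_iff arr n (n - 3).toNat 3 rfl (le_refl 3)]
  constructor
  · rintro ⟨i, j, k, h, h1, h2, h3, h4, h5, h6, h7⟩
    exact ⟨i, j, k, h, h1, h2, h3, h4, h6, h7⟩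
  · rintro ⟨i, j, k, h, h1, h2, h3, h4, h6, h7⟩
    exact ⟨i, j, k, h, h1, h2, h3, h4, by omega, h6, h7⟩

lemma pv_B_cases (n : Int) (arr : List Int) :
    check_gray_code_property_alt n arr = "Yes" ∨ check_gray_code_property_alt n arr = "No" := by
  unfold check_gray_code_property_alt
  split_ifs
  · left; rfl
  · generalize PySem.List.pyRange 3 n 1 = hs
    induction hs with
    | nil => right; rfl
    | cons h rest ih =>
      rw [pvAltH]
      split_ifs
      · left; rfl
      · exact ih

-- ===== VERDICT (by name: the statement is the Claim_ definition above) =====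
theorem check_gray_code_property_spec : Claim_equal_check_gray_code_property := by
  intro n arr _ _
  unfold Spec_check_gray_code_property
  by_cases hn : n > 130
  · unfold check_gray_code_property check_gray_code_property_alt
    rw [if_pos hn, if_pos hn]
  · by_cases hP : pvP4 arr n
    · rw [(pv_A_iff n arr hn).mpr hP, (pv_B_iff n arr hn).mpr hP]
    · rcases pv_A_cases n arr with hA | hA
      · exact absurd ((pv_A_iff n arr hn).mp hA) hP
      · rcases pv_B_cases n arr with hB | hB
        · exact absurd ((pv_B_iff n arr hn).mp hB) hP
        · rw [hA, hB]
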